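-- pv_equiv track=rewrite | github.com/yunyezl/algoitzman | nahee/DFS&BFS/Q18_괄호변환.py | solution
-- ===== SOURCE A (Python) =====
-- def check(p):
--     # 왼쪽 괄호의 갯수
--     count = 0
--     for i in p:
--         if i == '(':
--             count += 1
--         else:
--             # 시작부터 0이 되어버리면 왼쪽 괄호로 시작하지 않는 것이므로
--             if count == 0:
--                 return False
--             else:
--                 count -= 1
--     # 중간에 0이 되지 않고 p를 나오면 올바른 문자열이라는 것이므로
--     return True
--
-- def solution(p):
--     answer = ''
--     if p == "":
--         return answer
--     # 균형잡힌 괄호 문자열 u,v로 분리하기 위해 인덱스 찾기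
--     count = 0
--     index = 0
--     for i in range(len(p)):
--         if p[i] == '(':
--             count += 1
--         else:
--             count -= 1
--         if count == 0:
--             index = i
--     # u랑 v로 분리
--     u = p[:index+1]
--     v = p[index+1:]
--     # u가 올바른 괄호 문자열이면 v에 대해 재귀호출
--     if check(u):
--         answer = u + solution(v)
--     # u가 올바른 괄호 문자열이 아니면 시키는대로 하기
--     else:
--         answer = "("
--         answer += solution(v)
--         answer += ")"
--         # 앞 뒤 하나씩 빼서 새로운 문자열
--         new_u = u[1:-1]
--         # 문자열 뒤집기
--         new_u = new_u[::-1]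
--         answer += new_u
--     return answer
-- ===== SOURCE B (Python) =====
-- def _ok(u):
--     bal = 0
--     for ch in u:
--         bal += 1 if ch == '(' else -1
--         if bal < 0:
--             return False
--     return True
--
-- def solution(p):
--     heads = []
--     tails = []
--     while p:
--         bal = 0
--         index = 0
--         for i, ch in enumerate(p):
--             bal += 1 if ch == '(' else -1
--             if bal == 0:
--                 index = i
--         u, p = p[:index + 1], p[index + 1:]
--         if _ok(u):
--             heads.append(u)
--         else:
--             heads.append("(")
--             tails.append(")" + u[1:-1][::-1])
--     return "".join(heads) + "".join(reversed(tails))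
-- ===== Notes on version B (the rewrite author's own statement) =====
-- stated objective: alternative
-- what changed: Replaces A's recursion with an explicit while loop that keeps a forward head accumulator and a LIFO stack of tail fragments, joining heads then popped tails at the end.
import Mathlib
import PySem

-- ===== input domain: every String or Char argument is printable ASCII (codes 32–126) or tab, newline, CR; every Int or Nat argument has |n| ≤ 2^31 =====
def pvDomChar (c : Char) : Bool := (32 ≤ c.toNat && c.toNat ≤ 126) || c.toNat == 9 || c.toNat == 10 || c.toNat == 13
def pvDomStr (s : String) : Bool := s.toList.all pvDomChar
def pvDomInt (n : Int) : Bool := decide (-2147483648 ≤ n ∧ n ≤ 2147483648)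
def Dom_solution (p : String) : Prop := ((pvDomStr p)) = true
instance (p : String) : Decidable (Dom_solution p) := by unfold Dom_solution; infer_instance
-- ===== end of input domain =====

-- B replaces A's recursion by an explicit loop with a head accumulator and a stack of tail
-- fragments (objective: alternative decomposition, same cost).

-- ===== PORT A =====
-- check(p): scans with a counter; False when a non-'(' char is seen at counter 0.
def checkA : List Char → Int → Bool
  | [], _ => true
  | c :: rest, count =>
    if c = '(' then checkA rest (count + 1)
    else if count = 0 then false else checkA rest (count - 1)

-- the index loop of solution: last i where the running count returns to 0 (0 if never).
def lastZeroIdx : List Char → Nat → Int → Nat → Nat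
  | [], _, _, index => index
  | c :: rest, i, count, index =>
    let count' := if c = '(' then count + 1 else count - 1
    let index' := if count' = 0 then i else index
    lastZeroIdx rest (i + 1) count' index'

-- recursive body of A's solution, over List Char (Python string concat = list append)
def solutionCore (cs : List Char) : List Char :=
  if _h : cs = [] then [] else
    let index := lastZeroIdx cs 0 0 0
    let u := cs.take (index + 1)
    let v := cs.drop (index + 1)
    if checkA u 0 then u ++ solutionCore v
    else '(' :: solutionCore v ++ ')' :: ((u.drop 1).dropLast).reverse
termination_by cs.length
decreasing_by
  all_goals have hpos : 0 < cs.length := List.length_pos_iff.mpr _h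
  all_goals simp [List.length_drop]; omega

def solution (p : String) : String := String.ofList (solutionCore p.toList)

-- ===== PORT B =====
-- B's _ok: balance scan, fail as soon as the balance goes negative.
def okB : List Char → Int → Bool
  | [], _ => true
  | c :: rest, bal =>
    let bal' := bal + (if c = '(' then 1 else -1)
    if bal' < 0 then false else okB rest bal'

-- B's while loop: heads accumulator `acc` (already joined) and tail stack (latest pushed first,
-- so joining the stack front-to-back = popping).
def altLoop : List Char → List Char → List (List Char) → List Char
  | [], acc, tails => acc ++ tails.flatten
  | cs@(_ :: _), acc, tails =>
    let index := lastZeroIdx cs 0 0 0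
    let u := cs.take (index + 1)
    let v := cs.drop (index + 1)
    if okB u 0 then altLoop v (acc ++ u) tails
    else altLoop v (acc ++ ['(']) ((')' :: ((u.drop 1).dropLast).reverse) :: tails)
termination_by cs => cs.length
decreasing_by
  all_goals (rename_i hcs _; subst hcs; simp [List.length_drop])

def solution_alt (p : String) : String := String.ofList (altLoop p.toList [] [])

-- ===== PRECONDITION & SPEC =====
def Spec_solution (p : String) (out : String) : Prop := out = solution_alt p
instance (p : String) (out : String) : Decidable (Spec_solution p out) := by unfold Spec_solution; infer_instance

-- ===== CLAIM (what is proved, stated in full; the proofs are below) =====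
def Claim_equal_solution : Prop := ∀ (p : String), Dom_solution p → Spec_solution p (solution p)

-- ===== LEMMAS AND PROOFS =====

-- B's negative-balance test equals A's counter test on nonnegative counters.
lemma okB_eq_checkA : ∀ (cs : List Char) (n : Int), 0 ≤ n → okB cs n = checkA cs n := by
  intro cs
  induction cs with
  | nil => intro n _; rfl
  | cons c rest ih =>
    intro n hn
    by_cases hc : c = '('
    · simp [okB, checkA, hc]
      have : ¬ (n + 1 < 0) := by omega
      simp [this]
      exact ih (n + 1) (by omega)
    · by_cases h0 : n = 0
      · simp [okB, checkA, hc, h0]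
      · have hlt : ¬ (n + -1 < 0) := by omega
        simp [okB, checkA, hc, h0, hlt]
        exact ih (n - 1) (by omega)

-- loop invariant: the iterative loop produces acc ++ (A's recursive answer) ++ joined tail stack
lemma altLoop_inv : ∀ (cs acc : List Char) (tails : List (List Char)),
    altLoop cs acc tails = acc ++ solutionCore cs ++ tails.flatten := by
  intro cs acc tails
  induction cs, acc, tails using altLoop.induct
  case case1 acc tails => simp [altLoop, solutionCore]
  case case2 hd tl acc tails idx u v hok ih =>
    rw [altLoop, solutionCore, dif_neg (List.cons_ne_nil hd tl)]
    have hok' : okB (List.take (lastZeroIdx (hd :: tl) 0 0 0 + 1) (hd :: tl)) 0 = true := hok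
    have hch : checkA (List.take (lastZeroIdx (hd :: tl) 0 0 0 + 1) (hd :: tl)) 0 = true := by
      rw [← okB_eq_checkA _ 0 le_rfl]; exact hok'
    rw [if_pos hok', if_pos hch, ih]
    simp only [u, v, idx, List.take_succ_cons, List.drop_succ_cons, List.append_assoc, List.cons_append]
  case case3 hd tl acc tails idx u v hok ih =>
    rw [altLoop, solutionCore, dif_neg (List.cons_ne_nil hd tl)]
    have hok' : ¬ okB (List.take (lastZeroIdx (hd :: tl) 0 0 0 + 1) (hd :: tl)) 0 = true := hok
    have hch : ¬ checkA (List.take (lastZeroIdx (hd :: tl) 0 0 0 + 1) (hd :: tl)) 0 = true := by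
      rw [← okB_eq_checkA _ 0 le_rfl]; exact hok'
    rw [if_neg hok', if_neg hch, ih]
    simp [u, v, idx, List.take_succ_cons, List.drop_succ_cons, List.append_assoc]

-- ===== VERDICT (by name: the statement is the Claim_ definition above) =====
theorem solution_spec : Claim_equal_solution := by
  intro p _
  unfold Spec_solution solution solution_alt
  rw [altLoop_inv]
  simp
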